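-- pv_equiv track=rewrite | github.com/risingfruition/wordle_utils | filter.py | sort_scores
-- ===== SOURCE A (Python) =====
-- def sort_scores(guess: str, score: list[int]) -> dict:
--     d = {}
--     for i, c in enumerate(guess):
--         d[c] = d.get(c, list())
--         d[c].append((score[i], i))
--     for k in d:
--         d[k].sort()
--     return d
-- ===== SOURCE B (Python) =====
-- def sort_scores(guess: str, score: list[int]) -> dict:
--     # One global sort of indices by (score, index); each group is then filled
--     # in already-sorted order, so no per-group sort is needed.
--     order = sorted(range(len(guess)), key=lambda i: (score[i], i))
--     d = {c: [] for c in guess}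
--     for i in order:
--         d[guess[i]].append((score[i], i))
--     return d
-- ===== Notes on version B (the rewrite author's own statement) =====
-- stated objective: alternative
-- what changed: B replaces A's build-groups-then-sort-each-group strategy by one global sort of all indices by (score, index), then distributes the pairs into per-character groups which are therefore filled in already-sorted order, needing no per-group sort.
import Mathlib
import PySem

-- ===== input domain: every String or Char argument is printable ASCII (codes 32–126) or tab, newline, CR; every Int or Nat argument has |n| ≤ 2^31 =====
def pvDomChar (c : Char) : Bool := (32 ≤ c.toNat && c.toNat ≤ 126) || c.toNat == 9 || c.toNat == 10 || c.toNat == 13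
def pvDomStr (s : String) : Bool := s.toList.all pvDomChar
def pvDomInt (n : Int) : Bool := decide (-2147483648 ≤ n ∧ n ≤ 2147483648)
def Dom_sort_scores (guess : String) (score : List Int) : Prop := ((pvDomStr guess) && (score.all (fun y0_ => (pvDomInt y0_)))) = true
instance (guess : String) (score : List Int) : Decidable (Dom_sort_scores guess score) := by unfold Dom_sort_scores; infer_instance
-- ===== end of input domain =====

-- B replaces A's per-key list sorts by ONE global sort of the indices by (score, index),
-- distributing pairs into the groups in already-sorted order (same cost, different decomposition).

-- ===== PORT A =====
-- d[c] = d.get(c, list()); d[c].append((score[i], i))   ≡   d.modify c [] (· ++ [(score[i], i)])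
-- list.sort() on (Int, Int) tuples is Python's lexicographic tuple sort: PySem.List.sorted2.
def sort_scores (guess : String) (score : List Int) : List (String × List (Int × Int)) :=
  let d1 : PySem.Dict String (List (Int × Int)) :=
    (PySem.List.enumerate guess.toList).foldl
      (fun d p => d.modify (String.mk [p.2]) []
        (fun v => v ++ [(PySem.List.pyGetD score p.1 0, p.1)]))
      PySem.Dict.empty
  let d2 := d1.keys.foldl
      (fun d k => d.insert k (PySem.List.sorted2 (d.getD k []) (fun q => q.1) (fun q => q.2))) d1
  d2.items

-- ===== PORT B =====
def sort_scores_alt (guess : String) (score : List Int) : List (String × List (Int × Int)) :=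
  let cs := guess.toList
  let order := PySem.List.sorted2 (List.range cs.length)
      (fun i => PySem.List.pyGetD score (i : Int) 0) (fun i => ((i : Nat) : Int))
  let d0 := cs.foldl (fun d c => d.insert (String.mk [c]) ([] : List (Int × Int)))
      PySem.Dict.empty
  let d := order.foldl
      (fun d i => d.modify (String.mk [cs.getD i ' ']) []
        (fun v => v ++ [(PySem.List.pyGetD score (i : Int) 0, ((i : Nat) : Int))])) d0
  d.items

-- ===== PRECONDITION & SPEC =====
-- Pre_ excludes exactly the inputs where Python's score[i] raises IndexError (score shorter than guess).
def Pre_sort_scores (guess : String) (score : List Int) : Prop :=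
  guess.toList.length ≤ score.length
instance (guess : String) (score : List Int) : Decidable (Pre_sort_scores guess score) := by
  unfold Pre_sort_scores; infer_instance
def pvWitness_sort_scores : String × List Int := ("aba", [2, 1, 0])

def Spec_sort_scores (guess : String) (score : List Int) (out : List (String × List (Int × Int))) : Prop := out = sort_scores_alt guess score
instance (guess : String) (score : List Int) (out : List (String × List (Int × Int))) : Decidable (Spec_sort_scores guess score out) := by unfold Spec_sort_scores; infer_instance

-- ===== CLAIM (what is proved, stated in full; the proofs are below) =====
def Claim_equal_sort_scores : Prop := ∀ (guess : String) (score : List Int), Dom_sort_scores guess score → Pre_sort_scores guess score → Spec_sort_scores guess score (sort_scores guess score)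

-- ===== LEMMAS AND PROOFS =====

-- Python's lexicographic tuple sort is a plain sort by the lexicographic key.
theorem sorted2_eq_sorted_toLex {α : Type} (xs : List α) (k1 k2 : α → Int) :
    PySem.List.sorted2 xs k1 k2 = PySem.List.sorted xs (fun x => toLex (k1 x, k2 x)) := by
  rw [PySem.List.sorted_eq_foldl_insertBy]
  simp only [PySem.List.sorted2]
  have hcmp : (fun a b => decide (k1 a < k1 b) || (!decide (k1 b < k1 a) && decide (k2 a < k2 b)))
      = (fun a b => decide (toLex (k1 a, k2 a) < toLex (k1 b, k2 b))) := by
    funext a b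
    have h : (toLex (k1 a, k2 a) < toLex (k1 b, k2 b)) ↔
        (k1 a < k1 b ∨ (k1 a = k1 b ∧ k2 a < k2 b)) := Prod.Lex.lt_iff
    rw [Bool.eq_iff_iff]
    simp only [Bool.or_eq_true, Bool.and_eq_true, Bool.not_eq_true',
      decide_eq_true_eq, decide_eq_false_iff_not, h]
    omega
  rw [hcmp]
  simp

-- A fold of inserts over distinct existing keys: keys unchanged, each value rewritten once.
theorem foldl_sort_keys (F : List (Int × Int) → List (Int × Int)) :
    ∀ (ks : List String) (d : PySem.Dict String (List (Int × Int))),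
      ks.Nodup → (∀ k ∈ ks, d.contains k = true) →
      (ks.foldl (fun d k => d.insert k (F (d.getD k []))) d).keys = d.keys ∧
      ∀ j, (ks.foldl (fun d k => d.insert k (F (d.getD k []))) d).getD j []
          = if j ∈ ks then F (d.getD j []) else d.getD j [] := by
  intro ks
  induction ks with
  | nil => intro d _ _; simp
  | cons k ks ih =>
    intro d hnd hsub
    have hk : d.contains k = true := hsub k (List.mem_cons_self)
    set d' := d.insert k (F (d.getD k [])) with hd'
    have hkeys' : d'.keys = d.keys := PySem.Dict.keys_insert_of_contains d _ hk
    have hsub' : ∀ k' ∈ ks, d'.contains k' = true := by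
      intro k' hk'
      rw [PySem.Dict.contains_iff_mem_keys, hkeys', ← PySem.Dict.contains_iff_mem_keys]
      exact hsub k' (List.mem_cons_of_mem _ hk')
    obtain ⟨ihk, ihg⟩ := ih d' hnd.of_cons hsub'
    have hknot : k ∉ ks := (List.nodup_cons.mp hnd).1
    refine ⟨by simpa [hkeys'] using ihk, ?_⟩
    intro j
    simp only [List.foldl_cons, ← hd']
    rw [ihg j]
    by_cases hjk : j = k
    · subst hjk
      simp only [hknot, if_false, List.mem_cons, true_or, if_true, hd',
        PySem.Dict.getD_insert_self]
    · rw [hd', PySem.Dict.getD_insert_of_ne d _ _ hjk]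
      by_cases hjm : j ∈ ks
      · simp [hjm, hjk]
      · simp [hjm, hjk]

-- The dict-comprehension {c: [] for c in guess}: every value lookup (default []) is [].
theorem getD_foldl_insert_nil :
    ∀ (cs : List Char) (d : PySem.Dict String (List (Int × Int))),
      (∀ j, d.getD j [] = ([] : List (Int × Int))) →
      ∀ j, (cs.foldl (fun d c => d.insert (String.mk [c]) ([] : List (Int × Int))) d).getD j [] = [] := by
  intro cs
  induction cs with
  | nil => intro d h j; simpa using h j
  | cons c cs ih =>
    intro d h j
    simp only [List.foldl_cons]
    refine ih _ ?_ j
    intro j'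
    rw [PySem.Dict.getD_insert]
    split <;> simp [h]

-- Updating a set with elements it already contains leaves it unchanged.
theorem set_update_of_mem {α : Type} [BEq α] [LawfulBEq α] :
    ∀ (l : List α) (s : PySem.Set α), (∀ x ∈ l, x ∈ s) → PySem.Set.update s l = s := by
  intro l
  induction l with
  | nil => intro s _; exact PySem.Set.update_nil s
  | cons x l ih =>
    intro s hs
    rw [PySem.Set.update_cons, PySem.Set.add_of_mem (hs x (List.mem_cons_self))]
    exact ih s (fun y hy => hs y (List.mem_cons_of_mem _ hy))

-- The index-view of enumerate(guess).
theorem enumerate_eq_map_range (cs : List Char) :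
    PySem.List.enumerate cs = (List.range cs.length).map (fun j : Nat => ((j : Int), cs.getD j ' ')) := by
  rw [PySem.List.enumerate_eq_map_pyRange cs ' ']
  have hlen : PySem.List.len cs = (cs.length : Int) := rfl
  rw [hlen, PySem.List.pyRange_zero_natCast, List.map_map]
  refine List.map_congr_left ?_
  intro j _
  simp [Function.comp, PySem.List.pyGetD_natCast]

-- Core: A's per-group sort of the group of k equals B's sorted-order distribution into k.
theorem core_group (cs : List Char) (score : List Int) (k : String) :
    PySem.List.sorted2
      ((((PySem.List.enumerate cs).map
            (fun p => (String.mk [p.2], (PySem.List.pyGetD score p.1 0, p.1)))).filter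
          (fun q => q.1 == k)).map (fun q => q.2))
      (fun q => q.1) (fun q => q.2)
    = (((PySem.List.sorted2 (List.range cs.length)
          (fun i => PySem.List.pyGetD score (i : Int) 0) (fun i => ((i : Nat) : Int))).map
            (fun i => (String.mk [cs.getD i ' '], (PySem.List.pyGetD score (i : Int) 0, ((i : Nat) : Int))))).filter
          (fun q => q.1 == k)).map (fun q => q.2) := by
  rw [enumerate_eq_map_range, List.map_map, List.filter_map, List.map_map,
      List.filter_map, List.map_map]
  set order := PySem.List.sorted2 (List.range cs.length)
      (fun i => PySem.List.pyGetD score (i : Int) 0) (fun i => ((i : Nat) : Int)) with horder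
  have hperm : order.Perm (List.range cs.length) :=
    PySem.List.sorted2_perm _ _ _ _
  rw [sorted2_eq_sorted_toLex]
  apply PySem.List.sorted_eq_of_perm_of_pairwise_lt
  · exact ((hperm.filter _).map _)
  · rw [List.pairwise_map]
    have hpw : order.Pairwise (fun i j : Nat =>
        toLex (PySem.List.pyGetD score (i : Int) 0, ((i : Nat) : Int)) <
        toLex (PySem.List.pyGetD score (j : Int) 0, ((j : Nat) : Int))) := by
      have hle : order.Pairwise (fun i j : Nat =>
          toLex (PySem.List.pyGetD score (i : Int) 0, ((i : Nat) : Int)) ≤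
          toLex (PySem.List.pyGetD score (j : Int) 0, ((j : Nat) : Int))) := by
        rw [horder, sorted2_eq_sorted_toLex]
        exact PySem.List.sorted_pairwise _ _
      have hnd : order.Nodup := hperm.symm.nodup (List.nodup_range)
      exact (hle.and hnd).imp (fun {i j} hij => lt_of_le_of_ne hij.1 (by
        intro he
        apply hij.2
        have hp := toLex_inj.mp he
        have h2 : ((i : Nat) : Int) = ((j : Nat) : Int) := congrArg Prod.snd hp
        exact_mod_cast h2))
    exact List.Pairwise.sublist (List.filter_sublist) hpw

theorem sort_scores_spec : Claim_equal_sort_scores := by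
  intro guess score _hdom _hpre
  unfold Spec_sort_scores
  simp only [sort_scores, sort_scores_alt]
  set cs := guess.toList with hcs
  set K := PySem.Set.ofList (cs.map (fun c => String.mk [c])) with hK
  set fA : Int × Char → String × (Int × Int) :=
    fun p => (String.mk [p.2], (PySem.List.pyGetD score p.1 0, p.1)) with hfA
  set lA := (PySem.List.enumerate cs).map fA with hlA
  set d1 := (PySem.List.enumerate cs).foldl
      (fun d p => d.modify (String.mk [p.2]) []
        (fun v => v ++ [(PySem.List.pyGetD score p.1 0, p.1)])) PySem.Dict.empty with hd1def
  have hd1 : d1 = lA.foldl (fun d q => d.modify q.1 [] (fun v => v ++ [q.2])) PySem.Dict.empty := by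
    rw [hd1def, hlA, List.foldl_map]
  have hgetD1 : ∀ j, d1.getD j [] = (lA.filter (fun q => q.1 == j)).map (fun q => q.2) := by
    intro j
    rw [hd1, PySem.Dict.getD_foldl_modify_append]
    simp
  have hmapA : (PySem.List.enumerate cs).map (fun p : Int × Char => String.mk [p.2])
      = cs.map (fun c => String.mk [c]) := by
    conv_rhs => rw [← PySem.List.map_snd_enumerate cs 0]
    rw [List.map_map]
    rfl
  have hkeys1 : d1.keys = K := by
    rw [hd1, PySem.Dict.keys_foldl_modify_key, PySem.Dict.keys_empty,
      PySem.Set.update_nil_left, hlA, List.map_map, hK]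
    rw [show ((fun q : String × (Int × Int) => q.1) ∘ fA)
        = (fun p : Int × Char => String.mk [p.2]) from rfl, hmapA]
  have hnd1 : d1.keys.Nodup := by
    rw [hd1]
    exact PySem.Dict.nodup_keys_foldl_modify_key _ _ _ _ _ PySem.Dict.nodup_keys_empty
  have hsub1 : ∀ k ∈ d1.keys, d1.contains k = true :=
    fun k hk => (PySem.Dict.contains_iff_mem_keys d1 k).mpr hk
  obtain ⟨hk2, hg2⟩ := foldl_sort_keys
    (fun v => PySem.List.sorted2 v (fun q => q.1) (fun q => q.2)) d1.keys d1 hnd1 hsub1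
  set d2 := d1.keys.foldl (fun d k =>
      d.insert k (PySem.List.sorted2 (d.getD k []) (fun q => q.1) (fun q => q.2))) d1 with hd2def
  have hitemsA : d2.items
      = K.map (fun k => (k, PySem.List.sorted2
          ((lA.filter (fun q => q.1 == k)).map (fun q => q.2)) (fun q => q.1) (fun q => q.2))) := by
    rw [PySem.Dict.items_eq_map_keys d2 (by rw [hk2]; exact hnd1) [], hk2, ← hkeys1]
    refine List.map_congr_left ?_
    intro k hkK
    rw [hg2, if_pos hkK, hgetD1]
  -- B side
  set order := PySem.List.sorted2 (List.range cs.length)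
      (fun i => PySem.List.pyGetD score (i : Int) 0) (fun i => ((i : Nat) : Int)) with horder
  set fB : Nat → String × (Int × Int) :=
    fun i => (String.mk [cs.getD i ' '], (PySem.List.pyGetD score (i : Int) 0, ((i : Nat) : Int))) with hfB
  set lB := order.map fB with hlB
  set d0 := cs.foldl (fun d c => d.insert (String.mk [c]) ([] : List (Int × Int)))
      PySem.Dict.empty with hd0def
  have hd0keys : d0.keys = K := by
    rw [hd0def, PySem.Dict.keys_foldl_insert_key, PySem.Dict.keys_empty,
      PySem.Set.update_nil_left, hK]
  have hd0nodup : d0.keys.Nodup := by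
    rw [hd0def]
    exact PySem.Dict.nodup_keys_foldl_insert_key _ _ _ _ PySem.Dict.nodup_keys_empty
  have hd0getD : ∀ j, d0.getD j [] = ([] : List (Int × Int)) := by
    rw [hd0def]
    exact getD_foldl_insert_nil cs PySem.Dict.empty (fun j => by simp)
  set dB := order.foldl
      (fun d i => d.modify (String.mk [cs.getD i ' ']) []
        (fun v => v ++ [(PySem.List.pyGetD score (i : Int) 0, ((i : Nat) : Int))])) d0 with hdBdef
  have hdB : dB = lB.foldl (fun d q => d.modify q.1 [] (fun v => v ++ [q.2])) d0 := by
    rw [hdBdef, hlB, List.foldl_map]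
  have hgetDB : ∀ j, dB.getD j [] = (lB.filter (fun q => q.1 == j)).map (fun q => q.2) := by
    intro j
    rw [hdB, PySem.Dict.getD_foldl_modify_append, hd0getD]
    simp
  have hperm : order.Perm (List.range cs.length) := PySem.List.sorted2_perm _ _ _ _
  have hkeysB : dB.keys = K := by
    rw [hdBdef, PySem.Dict.keys_foldl_modify_key, hd0keys]
    apply set_update_of_mem
    intro x hx
    rcases List.mem_map.mp hx with ⟨i, hi, rfl⟩
    have hin : i < cs.length := List.mem_range.mp (hperm.mem_iff.mp hi)
    rw [hK]
    rw [PySem.Set.mem_ofList]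
    have hgd : cs.getD i ' ' = cs[i] := List.getD_eq_getElem cs ' ' hin
    exact List.mem_map.mpr ⟨cs[i], List.getElem_mem hin, by rw [hgd]⟩
  have hndB : dB.keys.Nodup := by
    rw [hdBdef]
    exact PySem.Dict.nodup_keys_foldl_modify_key _ _ _ _ _ hd0nodup
  have hitemsB : dB.items = K.map (fun k =>
      (k, (lB.filter (fun q => q.1 == k)).map (fun q => q.2))) := by
    rw [PySem.Dict.items_eq_map_keys _ hndB [], hkeysB]
    refine List.map_congr_left ?_
    intro k _
    rw [hgetDB]
  rw [hitemsA, hitemsB]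
  refine List.map_congr_left ?_
  intro k _
  rw [hlA, hfA, hlB, hfB, horder]
  exact congrArg (fun v => (k, v)) (core_group cs score k)
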